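-- pv_equiv track=rewrite | github.com/asooni/id-check | id_code.py | check_day_number
-- ===== SOURCE A (Python) =====
-- def check_day_number(year_number, month_number, day_number):
--     """
--     Check if given value is correct for day number in ID code.
--
--     Also, consider leap year and which month has 30 or 31 days.
--
--     :param year_number: int
--     :param month_number: int
--     :param day_number: int
--     :return: boolean
--     """
--     month31 = [1, 3, 5, 7, 8, 10, 12]
--     month30 = [4, 6, 9, 11]
--
--     for i in month31:
--         if month_number == i and day_number in range(1, 32):
--             return True
--
--     for j in month30:
--         if month_number == j and day_number in range(1, 31):
--             return True
--
--     if month_number == 2: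
--         if day_number in range(1, 29):
--             return True
--         elif check_leap_year(year_number) is True and day_number in range(1, 30):
--             return True
--         else:
--             return False
--
-- def check_leap_year(year_number):
--     """
--     Check if given year is a leap year. If True, it is a leap year.
--
--     :param year_number: int
--     :return: boolean
--     """
--     if (int(year_number) % 400) == 0:
--         return True
--     elif (int(year_number) % 100) == 0:
--         return False
--     elif (int(year_number) % 4) == 0:
--         return True
--     else:
--         return False
-- ===== SOURCE B (Python) =====
-- def check_leap_year(year_number):
--     y = int(year_number)
--     return y % 400 == 0 or (y % 100 != 0 and y % 4 == 0)
--
--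
-- def check_day_number(year_number, month_number, day_number):
--     # February is its own case; every other valid month's length is given by the
--     # closed-form 30 + (m + m // 8) % 2 (odd months before August and even ones
--     # from August on have 31 days), so no month tables are needed at all.
--     if month_number == 2:
--         if day_number in range(1, 29):
--             return True
--         if check_leap_year(year_number) and day_number in range(1, 30):
--             return True
--         return False
--     if month_number in range(1, 13):
--         limit = 30 + (month_number + month_number // 8) % 2
--         if day_number in range(1, limit + 1):
--             return True
-- ===== Notes on version B (the rewrite author's own statement) =====
-- stated objective: alternative
-- what changed: Replaces A's two month-list scans by a closed-form arithmetic month-length formula 30 + (m + m // 8) % 2, with February as its own branch; no month tables or scans remain.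
-- outside the precondition, e.g. on check_day_number(2000, 1, 40): A returns None, B returns None; on check_day_number(2000, 13, 5): A returns None, B returns None
import Mathlib
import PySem

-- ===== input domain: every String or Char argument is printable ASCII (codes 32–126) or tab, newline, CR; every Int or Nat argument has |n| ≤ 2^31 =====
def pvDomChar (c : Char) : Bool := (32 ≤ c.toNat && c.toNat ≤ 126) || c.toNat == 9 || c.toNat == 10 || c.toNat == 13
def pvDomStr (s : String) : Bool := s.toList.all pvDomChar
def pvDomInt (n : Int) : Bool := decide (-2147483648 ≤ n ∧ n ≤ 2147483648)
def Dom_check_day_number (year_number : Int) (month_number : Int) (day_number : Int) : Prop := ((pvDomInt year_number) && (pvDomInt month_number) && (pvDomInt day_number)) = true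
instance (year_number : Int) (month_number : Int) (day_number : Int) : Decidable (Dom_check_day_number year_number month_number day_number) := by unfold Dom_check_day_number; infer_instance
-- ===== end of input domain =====

-- B replaces A's month-list scans by the closed-form month-length formula 30 + (m + m // 8) % 2
-- (alternative, no speed claim). Equivalence is claimed on Pre_, the inputs where A returns a boolean.

-- ===== PORT A =====
def check_leap_year (year_number : Int) : Bool :=
  if PySem.Int.mod year_number 400 = 0 then true
  else if PySem.Int.mod year_number 100 = 0 then false
  else if PySem.Int.mod year_number 4 = 0 then true
  else false

def check_day_number (year_number : Int) (month_number : Int) (day_number : Int) : Bool :=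
  -- 'for i in month31: if …: return True' = any over the list
  if ([1, 3, 5, 7, 8, 10, 12] : List Int).any
       (fun i => month_number == i && decide (1 ≤ day_number ∧ day_number < 32)) then true
  else if ([4, 6, 9, 11] : List Int).any
       (fun j => month_number == j && decide (1 ≤ day_number ∧ day_number < 31)) then true
  else if month_number == 2 then
    if 1 ≤ day_number ∧ day_number < 29 then true
    else if check_leap_year year_number = true ∧ (1 ≤ day_number ∧ day_number < 30) then true
    else false
  else false  -- Python A returns None here; outside Pre_check_day_number

-- ===== PORT B =====
def check_leap_year_alt (year_number : Int) : Bool :=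
  PySem.Int.mod year_number 400 == 0 ||
    (PySem.Int.mod year_number 100 != 0 && PySem.Int.mod year_number 4 == 0)

def check_day_number_alt (year_number : Int) (month_number : Int) (day_number : Int) : Bool :=
  if month_number == 2 then
    if 1 ≤ day_number ∧ day_number < 29 then true
    else if check_leap_year_alt year_number && decide (1 ≤ day_number ∧ day_number < 30) then true
    else false
  else if 1 ≤ month_number ∧ month_number < 13 then
    let limit := 30 + PySem.Int.mod (month_number + PySem.Int.floordiv month_number 8) 2
    if 1 ≤ day_number ∧ day_number < limit + 1 then true
    else false  -- Python B falls through returning None; outside Pre_check_day_number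
  else false  -- likewise None; outside Pre_check_day_number

-- ===== PRECONDITION & SPEC =====
-- Pre_ excludes exactly the inputs where A falls off the end and returns None (not a boolean):
-- invalid month numbers, and out-of-range days in non-February months; B returns None there too.
def Pre_check_day_number (year_number : Int) (month_number : Int) (day_number : Int) : Prop :=
  month_number = 2 ∨
  (month_number ∈ ([1, 3, 5, 7, 8, 10, 12] : List Int) ∧ 1 ≤ day_number ∧ day_number ≤ 31) ∨
  (month_number ∈ ([4, 6, 9, 11] : List Int) ∧ 1 ≤ day_number ∧ day_number ≤ 30)
instance (year_number : Int) (month_number : Int) (day_number : Int) : Decidable (Pre_check_day_number year_number month_number day_number) := by unfold Pre_check_day_number; infer_instance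

def pvWitness_check_day_number : Int × Int × Int := (2000, 2, 29)

def Spec_check_day_number (year_number : Int) (month_number : Int) (day_number : Int) (out : Bool) : Prop := out = check_day_number_alt year_number month_number day_number
instance (year_number : Int) (month_number : Int) (day_number : Int) (out : Bool) : Decidable (Spec_check_day_number year_number month_number day_number out) := by unfold Spec_check_day_number; infer_instance

-- ===== CLAIM =====
def Claim_equal_check_day_number : Prop := ∀ (year_number : Int) (month_number : Int) (day_number : Int), Dom_check_day_number year_number month_number day_number → Pre_check_day_number year_number month_number day_number → Spec_check_day_number year_number month_number day_number (check_day_number year_number month_number day_number)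

-- ===== LEMMAS AND PROOFS =====
theorem leap_eq (y : Int) : check_leap_year y = check_leap_year_alt y := by
  unfold check_leap_year check_leap_year_alt
  simp only [PySem.Int.mod]
  by_cases h1 : Int.fmod y 400 = 0 <;> by_cases h2 : Int.fmod y 100 = 0 <;>
    by_cases h3 : Int.fmod y 4 = 0 <;> simp [h1, h2, h3]

-- ===== VERDICT =====
theorem check_day_number_spec : Claim_equal_check_day_number := by
  intro y m d _ hpre
  unfold Spec_check_day_number check_day_number check_day_number_alt
  rcases hpre with rfl | ⟨hm, hd1, hd2⟩ | ⟨hm, hd1, hd2⟩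
  · simp [leap_eq]
  · simp only [List.mem_cons, List.not_mem_nil, or_false] at hm
    rcases hm with rfl | rfl | rfl | rfl | rfl | rfl | rfl <;>
      (simp [PySem.Int.mod, PySem.Int.floordiv]; try omega)
  · simp only [List.mem_cons, List.not_mem_nil, or_false] at hm
    rcases hm with rfl | rfl | rfl | rfl <;>
      (simp [PySem.Int.mod, PySem.Int.floordiv]; try omega)
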